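-- pv_equiv track=rewrite | github.com/hariram32/freeztp | ztp.py | ciscohex
-- ===== SOURCE A (Python) =====
-- def ciscohex(hexdata):
-- 	last = 0
-- 	current = 1
-- 	templist = []
-- 	for char in hexdata:
-- 		if (len(hexdata) - last) < 4:
-- 			templist.append(hexdata[last:len(hexdata)])
-- 			break
-- 		elif current%4 == 0:
-- 			templist.append(hexdata[last:current])
-- 			last = current
-- 		current += 1
-- 	result = ""
-- 	for quad in templist:
-- 		result += quad + "."
-- 	return result[:len(result)-1]
-- ===== SOURCE B (Python) =====
-- def ciscohex(hexdata):
-- 	return ".".join(hexdata[i:i+4] for i in range(0, len(hexdata), 4))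
-- ===== Notes on version B (the rewrite author's own statement) =====
-- stated objective: simpler
-- what changed: Replaces the per-character loop with a modulo counter, manual break for the tail, and trailing-dot trimming by slicing per 4-char chunk over range(0, len, 4) and a single str.join.
import Mathlib
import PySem

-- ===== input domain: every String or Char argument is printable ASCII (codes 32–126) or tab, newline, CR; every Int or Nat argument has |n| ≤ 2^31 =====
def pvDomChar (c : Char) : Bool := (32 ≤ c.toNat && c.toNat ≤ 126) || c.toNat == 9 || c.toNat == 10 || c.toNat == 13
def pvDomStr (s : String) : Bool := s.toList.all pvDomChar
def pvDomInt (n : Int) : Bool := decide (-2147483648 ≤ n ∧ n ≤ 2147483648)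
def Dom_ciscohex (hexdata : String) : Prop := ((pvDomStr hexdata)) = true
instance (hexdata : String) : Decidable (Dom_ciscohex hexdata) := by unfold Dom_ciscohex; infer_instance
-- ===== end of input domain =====

-- B replaces A's per-character loop with modulo counter and trailing-dot trimming by
-- per-chunk slicing at step-4 positions and a single join (simpler decomposition).


-- ===== PORT A =====
-- the 'for char in hexdata' loop: state (last, current, templist); the break is the
-- first branch returning immediately; the char itself is unused, only the iteration count matters
def ciscohexLoopA (full : List Char) (rest : List Char) (last current : Int)
    (templist : List (List Char)) : List (List Char) :=
  match rest with
  | [] => templist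
  | _ :: rs =>
    if (full.length : Int) - last < 4 then
      templist ++ [PySem.List.slice full (some last) (some (full.length : Int))]
    else if PySem.Int.mod current 4 = 0 then
      ciscohexLoopA full rs current (current + 1)
        (templist ++ [PySem.List.slice full (some last) (some current)])
    else
      ciscohexLoopA full rs last (current + 1) templist

def ciscohex (hexdata : String) : String :=
  let cs := hexdata.toList
  let templist := ciscohexLoopA cs cs 0 1 []
  let result := templist.foldl (fun r q => r ++ q ++ ['.']) []
  String.ofList (PySem.List.slice result none (some ((result.length : Int) - 1)))

-- ===== PORT B =====
def ciscohex_alt (hexdata : String) : String :=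
  let cs := hexdata.toList
  String.ofList (PySem.Chars.join ['.']
    ((PySem.List.pyRange 0 (cs.length : Int) 4).map
      (fun i => PySem.List.slice cs (some i) (some (i + 4)))))

-- ===== PRECONDITION & SPEC =====
def Spec_ciscohex (hexdata : String) (out : String) : Prop := out = ciscohex_alt hexdata
instance (hexdata : String) (out : String) : Decidable (Spec_ciscohex hexdata out) := by unfold Spec_ciscohex; infer_instance

-- ===== CLAIM (what is proved, stated in full; the proofs are below) =====
def Claim_equal_ciscohex : Prop := ∀ (hexdata : String), Dom_ciscohex hexdata → Spec_ciscohex hexdata (ciscohex hexdata)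

-- ===== LEMMAS AND PROOFS =====

-- step-4 range: nil and cons forms (derived from PySem.List.pyRange_of_pos)
lemma pyRange4_nil (a b : Int) (h : b ≤ a) : PySem.List.pyRange a b 4 = [] := by
  rw [PySem.List.pyRange_of_pos a b (by norm_num)]
  simp [if_neg (by omega : ¬ a < b)]

lemma pyRange4_cons (a b : Int) (h : a < b) :
    PySem.List.pyRange a b 4 = a :: PySem.List.pyRange (a + 4) b 4 := by
  rw [PySem.List.pyRange_of_pos a b (by norm_num),
      PySem.List.pyRange_of_pos (a + 4) b (by norm_num)]
  have hN : (if a < b then ((b - a + 4 - 1) / 4).toNat else 0)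
      = (if a + 4 < b then ((b - (a + 4) + 4 - 1) / 4).toNat else 0) + 1 := by
    split_ifs <;> omega
  rw [hN, List.range_succ_eq_map, List.map_cons, List.map_map]
  congr 1
  · simp
  · exact List.map_congr_left (fun k _ => by simp [Function.comp]; ring)

-- the loop, started at a chunk boundary 4*m, produces exactly the step-4 chunks from 4*m on
lemma loopA_eq (cs : List Char) : ∀ (n m : Nat) (acc : List (List Char)),
    cs.length - 4 * m = n →
    ciscohexLoopA cs (cs.drop (4 * m)) (4 * (m : Int)) (4 * (m : Int) + 1) acc
      = acc ++ (PySem.List.pyRange (4 * (m : Int)) (cs.length : Int) 4).map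
          (fun i => PySem.List.slice cs (some i) (some (i + 4))) := by
  intro n
  induction n using Nat.strong_induction_on with
  | _ n IH =>
    intro m acc hn
    by_cases hle : cs.length ≤ 4 * m
    · -- rest is empty, range is empty
      rw [List.drop_eq_nil_of_le hle, pyRange4_nil _ _ (by omega)]
      simp [ciscohexLoopA]
    · rw [Nat.not_le] at hle
      have hcons := pyRange4_cons (4 * (m : Int)) (cs.length : Int) (by omega)
      by_cases hsmall : cs.length - 4 * m < 4
      · -- fewer than 4 chars remain: A appends the tail and breaks; the range has one element
        obtain ⟨c, rs, hrest⟩ : ∃ c rs, cs.drop (4 * m) = c :: rs := by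
          cases h : cs.drop (4 * m) with
          | nil => exact absurd (by simpa using congrArg List.length h) (by omega)
          | cons c rs => exact ⟨c, rs, rfl⟩
        rw [hrest]
        have hbr : ((cs.length : Int) - 4 * (m : Int) < 4) := by omega
        simp only [ciscohexLoopA, if_pos hbr]
        rw [hcons, pyRange4_nil _ _ (by omega)]
        have hsl : PySem.List.slice cs (some (4 * (m : Int))) (some (cs.length : Int))
            = PySem.List.slice cs (some (4 * (m : Int))) (some (4 * (m : Int) + 4)) := by
          rw [PySem.List.slice_toNat cs (by positivity) (by positivity),
              PySem.List.slice_toNat cs (by positivity) (by positivity)]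
          have h1 : ((cs.length : Int)).toNat = cs.length := by omega
          have h2 : ((4 * (m : Int))).toNat = 4 * m := by omega
          have h3 : ((4 * (m : Int) + 4)).toNat = 4 * m + 4 := by omega
          rw [h1, h2, h3,
              List.take_of_length_le (by simp only [List.length_drop]; omega),
              List.take_of_length_le (by simp only [List.length_drop]; omega)]
        rw [hsl]; simp
      · -- at least 4 chars remain: unroll four iterations, then recurse at boundary m+1
        obtain ⟨c1, c2, c3, c4, rs, hrest⟩ :
            ∃ c1 c2 c3 c4 rs, cs.drop (4 * m) = c1 :: c2 :: c3 :: c4 :: rs := by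
          have hlen : (cs.drop (4 * m)).length = cs.length - 4 * m := by simp
          match h : cs.drop (4 * m) with
          | [] | [_] | [_, _] | [_, _, _] =>
            rw [h] at hlen; simp at hlen; omega
          | c1 :: c2 :: c3 :: c4 :: rs => exact ⟨c1, c2, c3, c4, rs, rfl⟩
        have hbr : ¬ ((cs.length : Int) - 4 * (m : Int) < 4) := by omega
        have hm1 : PySem.Int.mod (4 * (m : Int) + 1) 4 ≠ 0 := by
          rw [PySem.Int.mod_eq_emod_of_pos (by norm_num)]; omega
        have hm2 : PySem.Int.mod (4 * (m : Int) + 1 + 1) 4 ≠ 0 := by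
          rw [PySem.Int.mod_eq_emod_of_pos (by norm_num)]; omega
        have hm3 : PySem.Int.mod (4 * (m : Int) + 1 + 1 + 1) 4 ≠ 0 := by
          rw [PySem.Int.mod_eq_emod_of_pos (by norm_num)]; omega
        have hm4 : PySem.Int.mod (4 * (m : Int) + 1 + 1 + 1 + 1) 4 = 0 := by
          rw [PySem.Int.mod_eq_emod_of_pos (by norm_num)]; omega
        rw [hrest]
        simp only [ciscohexLoopA, if_neg hbr, if_neg hm1, if_neg hm2, if_neg hm3, if_pos hm4]
        have hrs : rs = cs.drop (4 * (m + 1)) := by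
          have : cs.drop (4 * (m + 1)) = (cs.drop (4 * m)).drop 4 := by
            rw [List.drop_drop]; ring_nf
          rw [this, hrest]; rfl
        have harg1 : (4 * (m : Int) + 1 + 1 + 1 + 1) = 4 * ((m + 1 : Nat) : Int) := by
          push_cast; ring
        rw [hrs, harg1, IH (n - 4) (by omega) (m + 1) _ (by omega), hcons]
        have harg3 : ((4 : Int) * (m : Int) + 4) = 4 * ((m + 1 : Nat) : Int) := by
          push_cast; ring
        rw [← harg3]
        simp
-- trimming the trailing dot: result[:len(result)-1] is dropLast
lemma slice_len_sub_one (xs : List Char) :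
    PySem.List.slice xs none (some ((xs.length : Int) - 1)) = xs.dropLast := by
  cases xs with
  | nil => simpa using PySem.List.slice_to_neg_one ([] : List Char)
  | cons x t =>
    rw [PySem.List.slice_to _ (by simp)]
    rw [List.dropLast_eq_take]
    congr 1
    omega

-- A's dot-appending fold followed by dropLast is exactly join with "."
lemma flatMap_dot_dropLast (L : List (List Char)) :
    (L.flatMap (fun q => q ++ ['.'])).dropLast = PySem.Chars.join ['.'] L := by
  induction L with
  | nil => simp [PySem.Chars.join, List.intercalate]
  | cons x t ih =>
    cases t with
    | nil => simp [PySem.Chars.join_singleton]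
    | cons y u =>
      have hne : ((y :: u).flatMap (fun q => q ++ ['.'])).isEmpty = false := by
        simp [List.flatMap_cons]
      rw [PySem.Chars.join_cons_cons, List.flatMap_cons, List.dropLast_append, hne]
      simp only [Bool.false_eq_true, if_false]
      rw [ih]

-- ===== VERDICT (by name: the statement is the Claim_ definition above) =====
theorem ciscohex_spec : Claim_equal_ciscohex := by
  intro hexdata _
  unfold Spec_ciscohex ciscohex ciscohex_alt
  simp only []
  have hloop := loopA_eq hexdata.toList (hexdata.toList.length) 0 []
    (by simp)
  simp only [Nat.mul_zero, Nat.cast_zero, Int.mul_zero, List.drop_zero, zero_add] at hloop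
  rw [hloop, List.nil_append]
  have hfun : (fun (r q : List Char) => r ++ q ++ ['.']) = (fun (r q : List Char) => r ++ (q ++ ['.'])) := by
    funext r q; simp [List.append_assoc]
  rw [hfun, PySem.List.foldl_append_eq_flatMap (fun q => q ++ ['.']) _ []]
  rw [List.nil_append, slice_len_sub_one, flatMap_dot_dropLast]
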